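-- pv_equiv track=rewrite | github.com/acryptco/modevaert | app.py | find_matching_member
-- ===== SOURCE A (Python) =====
-- def normalize_name(name):
--     """Normalize a name for comparison by removing extra spaces and converting to lowercase"""
--     return ' '.join(name.split()).lower()
--
-- def find_matching_member(pdf_name, members_list):
--     """Find a matching member name from the members list, handling variations"""
--     normalized_pdf_name = normalize_name(pdf_name)
--
--     # First try exact match
--     for member in members_list:
--         if normalize_name(member) == normalized_pdf_name:
--             return member
--
--     # Try partial matches (e.g., "Michael Vollenberg Keler" matches "Michael Keler")
--     for member in members_list:
--         normalized_member = normalize_name(member)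
--         # Check if the member name is contained in the PDF name or vice versa
--         if (normalized_member in normalized_pdf_name or
--             normalized_pdf_name in normalized_member):
--             return member
--
--     # Try matching by last name (most reliable for Danish names)
--     pdf_words = normalized_pdf_name.split()
--     for member in members_list:
--         normalized_member = normalize_name(member)
--         member_words = normalized_member.split()
--
--         # Check if any word from PDF name matches any word from member name
--         for pdf_word in pdf_words:
--             for member_word in member_words:
--                 if pdf_word == member_word and len(pdf_word) > 2:  # Avoid matching short words
--                     return member
--
--     return None
-- ===== SOURCE B (Python) =====
-- def normalize_name(name):
--     """Normalize a name for comparison by removing extra spaces and converting to lowercase"""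
--     return ' '.join(name.split()).lower()
--
-- def find_matching_member(pdf_name, members_list):
--     """Single classifying pass: each member gets a priority tier (1 exact, 2 substring,
--     3 shared word of length > 2); keep the first member seen at the lowest tier."""
--     npdf = normalize_name(pdf_name)
--     pdf_words = npdf.split()
--     best = None  # (tier, member)
--     for member in members_list:
--         nm = normalize_name(member)
--         if nm == npdf:
--             tier = 1
--         elif nm in npdf or npdf in nm:
--             tier = 2
--         else:
--             mwords = nm.split()
--             if any(w in mwords for w in pdf_words if len(w) > 2):
--                 tier = 3
--             else:
--                 continue
--         if best is None or tier < best[0]: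
--             best = (tier, member)
--             if tier == 1:
--                 break
--     return best[1] if best else None
-- ===== Notes on version B (the rewrite author's own statement) =====
-- stated objective: alternative
-- what changed: Replaced A's three sequential full scans (exact, then substring, then shared-word) by a single pass that classifies each member into a priority tier once and keeps the first member at the lowest tier, breaking early on an exact match.
import Mathlib
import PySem

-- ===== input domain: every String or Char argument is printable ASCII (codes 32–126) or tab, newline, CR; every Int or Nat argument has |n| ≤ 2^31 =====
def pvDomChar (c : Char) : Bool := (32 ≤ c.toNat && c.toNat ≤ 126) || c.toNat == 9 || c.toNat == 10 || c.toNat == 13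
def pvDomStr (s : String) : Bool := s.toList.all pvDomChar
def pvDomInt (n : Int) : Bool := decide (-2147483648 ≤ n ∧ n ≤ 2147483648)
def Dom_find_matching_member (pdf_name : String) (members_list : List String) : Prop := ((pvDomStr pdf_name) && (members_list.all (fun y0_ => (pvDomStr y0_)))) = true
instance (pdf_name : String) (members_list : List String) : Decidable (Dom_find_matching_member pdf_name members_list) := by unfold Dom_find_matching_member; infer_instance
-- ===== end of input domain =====

-- B replaces A's three sequential scans of the list by a single classifying pass with priority-tier tracking (objective: alternative decomposition, same results).

-- ===== PORT A =====
def normalize_name (name : String) : String :=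
  PySem.Str.lower (PySem.Str.join " " (PySem.Str.split₀ name))

-- first for-loop of A: exact match
def fmmExact (npdf : String) : List String → Option String
  | [] => none
  | member :: rest =>
    if normalize_name member == npdf then some member else fmmExact npdf rest

-- second for-loop of A: substring match either way
def fmmPartial (npdf : String) : List String → Option String
  | [] => none
  | member :: rest =>
    if PySem.Str.isIn (normalize_name member) npdf
        || PySem.Str.isIn npdf (normalize_name member) then some member
    else fmmPartial npdf rest

-- third for-loop of A: the nested word loops return `member` on the first pair with pdf_word == member_word and len(pdf_word) > 2
def fmmByWord (pdf_words : List String) : List String → Option String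
  | [] => none
  | member :: rest =>
    if pdf_words.any (fun pdf_word =>
        (PySem.Str.split₀ (normalize_name member)).any (fun member_word =>
          pdf_word == member_word && decide (2 < PySem.Str.len pdf_word))) then
      some member
    else fmmByWord pdf_words rest

def find_matching_member (pdf_name : String) (members_list : List String) : Option String :=
  let normalized_pdf_name := normalize_name pdf_name
  match fmmExact normalized_pdf_name members_list with
  | some m => some m
  | none =>
    match fmmPartial normalized_pdf_name members_list with
    | some m => some m
    | none => fmmByWord (PySem.Str.split₀ normalized_pdf_name) members_list

-- ===== PORT B =====
def altNormalize (name : String) : String :=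
  PySem.Str.lower (PySem.Str.join " " (PySem.Str.split₀ name))

-- classify one member: tier 1 exact, tier 2 substring either way, tier 3 shared word of length > 2, none otherwise
def altTier? (npdf : String) (pdf_words : List String) (member : String) : Option Nat :=
  let nm := altNormalize member
  if nm == npdf then some 1
  else if PySem.Str.isIn nm npdf || PySem.Str.isIn npdf nm then some 2
  else
    if pdf_words.any (fun w => decide (2 < PySem.Str.len w)
        && (PySem.Str.split₀ nm).contains w) then some 3
    else none

-- one pass; `best` is the (tier, member) with the lowest tier so far, first member wins within a tier; tier 1 breaks
def altLoop (npdf : String) (pdf_words : List String) :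
    List String → Option (Nat × String) → Option (Nat × String)
  | [], best => best
  | member :: rest, best =>
    match altTier? npdf pdf_words member with
    | none => altLoop npdf pdf_words rest best
    | some tier =>
      if (match best with | none => true | some b => decide (tier < b.1)) then
        if tier == 1 then some (tier, member)
        else altLoop npdf pdf_words rest (some (tier, member))
      else altLoop npdf pdf_words rest best

def find_matching_member_alt (pdf_name : String) (members_list : List String) : Option String :=
  let npdf := altNormalize pdf_name
  (altLoop npdf (PySem.Str.split₀ npdf) members_list none).map Prod.snd

-- ===== PRECONDITION & SPEC =====
def Spec_find_matching_member (pdf_name : String) (members_list : List String) (out : Option String) : Prop := out = find_matching_member_alt pdf_name members_list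
instance (pdf_name : String) (members_list : List String) (out : Option String) : Decidable (Spec_find_matching_member pdf_name members_list out) := by unfold Spec_find_matching_member; infer_instance

-- ===== CLAIM (what is proved, stated in full; the proofs are below) =====
def Claim_equal_find_matching_member : Prop := ∀ (pdf_name : String) (members_list : List String), Dom_find_matching_member pdf_name members_list → Spec_find_matching_member pdf_name members_list (find_matching_member pdf_name members_list)

-- ===== LEMMAS AND PROOFS =====

theorem altNormalize_eq : altNormalize = normalize_name := rfl

theorem tier_of_c1 (npdf : String) (pw : List String) (m : String)
    (h1 : (normalize_name m == npdf) = true) : altTier? npdf pw m = some 1 := by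
  unfold altTier?; rw [altNormalize_eq, if_pos h1]

theorem tier_of_c2 (npdf : String) (pw : List String) (m : String)
    (h1 : (normalize_name m == npdf) = false)
    (h2 : (PySem.Str.isIn (normalize_name m) npdf || PySem.Str.isIn npdf (normalize_name m)) = true) :
    altTier? npdf pw m = some 2 := by
  unfold altTier?
  rw [altNormalize_eq, if_neg (by simp only [h1]; exact Bool.false_ne_true), if_pos h2]

theorem tier_of_c3 (npdf : String) (pw : List String) (m : String)
    (h1 : (normalize_name m == npdf) = false)
    (h2 : (PySem.Str.isIn (normalize_name m) npdf || PySem.Str.isIn npdf (normalize_name m)) = false)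
    (h3 : (pw.any (fun w => decide (2 < PySem.Str.len w)
        && (PySem.Str.split₀ (normalize_name m)).contains w)) = true) :
    altTier? npdf pw m = some 3 := by
  unfold altTier?
  rw [altNormalize_eq, if_neg (by simp only [h1]; exact Bool.false_ne_true),
    if_neg (by simp only [h2]; exact Bool.false_ne_true), if_pos h3]

theorem tier_of_none (npdf : String) (pw : List String) (m : String)
    (h1 : (normalize_name m == npdf) = false)
    (h2 : (PySem.Str.isIn (normalize_name m) npdf || PySem.Str.isIn npdf (normalize_name m)) = false)
    (h3 : (pw.any (fun w => decide (2 < PySem.Str.len w)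
        && (PySem.Str.split₀ (normalize_name m)).contains w)) = false) :
    altTier? npdf pw m = none := by
  unfold altTier?
  rw [altNormalize_eq, if_neg (by simp only [h1]; exact Bool.false_ne_true),
    if_neg (by simp only [h2]; exact Bool.false_ne_true),
    if_neg (by simp only [h3]; exact Bool.false_ne_true)]

-- B's word test for one member equals A's nested-any word test (Bool identity)
theorem word_cond_eq (pw mwords : List String) :
    (pw.any (fun w => decide (2 < PySem.Str.len w) && mwords.contains w))
      = (pw.any (fun pdf_word => mwords.any (fun member_word =>
          pdf_word == member_word && decide (2 < PySem.Str.len pdf_word)))) := by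
  rw [Bool.eq_iff_iff]
  simp only [List.any_eq_true, Bool.and_eq_true, decide_eq_true_eq,
    List.contains_iff_exists_mem_beq, beq_iff_eq]
  constructor
  · rintro ⟨w, hw, hlen, x, hx, rfl⟩; exact ⟨w, hw, w, hx, rfl, hlen⟩
  · rintro ⟨p, hp, q, hq, rfl, hlen⟩; exact ⟨p, hp, hlen, p, hq, rfl⟩

-- loop with a tier-2 best: only an exact match can replace it
theorem loop_two (npdf : String) (pw : List String) (l : List String) (x : String) :
    altLoop npdf pw l (some (2, x)) =
      match fmmExact npdf l with
      | some m => some (1, m)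
      | none => some (2, x) := by
  induction l with
  | nil => rfl
  | cons m rest ih =>
    simp only [altLoop, fmmExact]
    cases h1 : (normalize_name m == npdf) with
    | true =>
      rw [tier_of_c1 npdf pw m h1]
      simp only [reduceIte]
      rfl
    | false =>
      simp only [Bool.false_eq_true, if_false]
      cases h2 : (PySem.Str.isIn (normalize_name m) npdf || PySem.Str.isIn npdf (normalize_name m)) with
      | true =>
        rw [tier_of_c2 npdf pw m h1 h2]
        simpa using ih
      | false =>
        cases h3 : (pw.any (fun w => decide (2 < PySem.Str.len w)
            && (PySem.Str.split₀ (normalize_name m)).contains w)) with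
        | true =>
          rw [tier_of_c3 npdf pw m h1 h2 h3]
          simpa using ih
        | false =>
          rw [tier_of_none npdf pw m h1 h2 h3]
          exact ih

-- loop with a tier-3 best: an exact or substring match replaces it
theorem loop_three (npdf : String) (pw : List String) (l : List String) (x : String) :
    altLoop npdf pw l (some (3, x)) =
      match fmmExact npdf l with
      | some m => some (1, m)
      | none =>
        match fmmPartial npdf l with
        | some m => some (2, m)
        | none => some (3, x) := by
  induction l with
  | nil => rfl
  | cons m rest ih =>
    simp only [altLoop, fmmExact, fmmPartial]
    cases h1 : (normalize_name m == npdf) with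
    | true =>
      rw [tier_of_c1 npdf pw m h1]
      simp only [reduceIte]
      rfl
    | false =>
      simp only [Bool.false_eq_true, if_false]
      cases h2 : (PySem.Str.isIn (normalize_name m) npdf || PySem.Str.isIn npdf (normalize_name m)) with
      | true =>
        rw [tier_of_c2 npdf pw m h1 h2]
        simp [loop_two]
      | false =>
        simp only [Bool.false_eq_true, if_false]
        cases h3 : (pw.any (fun w => decide (2 < PySem.Str.len w)
            && (PySem.Str.split₀ (normalize_name m)).contains w)) with
        | true =>
          rw [tier_of_c3 npdf pw m h1 h2 h3]
          simpa using ih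
        | false =>
          rw [tier_of_none npdf pw m h1 h2 h3]
          exact ih

-- loop from the empty best equals A's three sequential scans
theorem loop_none (npdf : String) (pw : List String) (l : List String) :
    altLoop npdf pw l none =
      match fmmExact npdf l with
      | some m => some (1, m)
      | none =>
        match fmmPartial npdf l with
        | some m => some (2, m)
        | none => (fmmByWord pw l).map (fun m => (3, m)) := by
  induction l with
  | nil => rfl
  | cons m rest ih =>
    simp only [altLoop, fmmExact, fmmPartial, fmmByWord]
    cases h1 : (normalize_name m == npdf) with
    | true =>
      rw [tier_of_c1 npdf pw m h1]
      simp only [reduceIte]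
      rfl
    | false =>
      simp only [Bool.false_eq_true, if_false]
      cases h2 : (PySem.Str.isIn (normalize_name m) npdf || PySem.Str.isIn npdf (normalize_name m)) with
      | true =>
        rw [tier_of_c2 npdf pw m h1 h2]
        simp [loop_two]
      | false =>
        simp only [Bool.false_eq_true, if_false]
        cases h3 : (pw.any (fun w => decide (2 < PySem.Str.len w)
            && (PySem.Str.split₀ (normalize_name m)).contains w)) with
        | true =>
          rw [tier_of_c3 npdf pw m h1 h2 h3, ← word_cond_eq, h3]
          simp [loop_three]
        | false =>
          rw [tier_of_none npdf pw m h1 h2 h3, ← word_cond_eq, h3]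
          simpa using ih

-- ===== VERDICT (by name: the statement is the Claim_ definition above) =====
theorem find_matching_member_spec : Claim_equal_find_matching_member := by
  intro pdf_name members_list _
  unfold Spec_find_matching_member find_matching_member find_matching_member_alt
  simp only [altNormalize_eq, loop_none]
  cases fmmExact (normalize_name pdf_name) members_list with
  | some m => rfl
  | none =>
    cases fmmPartial (normalize_name pdf_name) members_list with
    | some m => rfl
    | none =>
      cases fmmByWord (PySem.Str.split₀ (normalize_name pdf_name)) members_list <;> rfl
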